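-- pv_equiv track=rewrite | github.com/SuperD3ni/scuola | Python/CalcoloLimiti.py | calcolaLimiti
-- ===== SOURCE A (Python) =====
-- def calcolaLimiti(reparto, lista):
--     i = 0
--     LimiteInf = -1
--     LimiteSup = -1
--     for i in range(len(lista)):
--         if lista[i] in reparto:
--             if LimiteInf == -1:
--                 LimiteInf = i
--             LimiteSup = i
--
--     return LimiteInf, LimiteSup
-- ===== SOURCE B (Python) =====
-- def calcolaLimiti(reparto, lista):
--     n = len(lista)
--     LimiteInf = -1
--     for i in range(n):
--         if lista[i] in reparto:
--             LimiteInf = i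
--             break
--     LimiteSup = -1
--     for i in range(n - 1, -1, -1):
--         if lista[i] in reparto:
--             LimiteSup = i
--             break
--     return LimiteInf, LimiteSup
-- ===== Notes on version B (the rewrite author's own statement) =====
-- stated objective: alternative
-- what changed: Replaced A's single stateful pass that keeps overwriting LimiteSup with two independent short-circuiting scans: a front-to-back scan breaking at the first match and a back-to-front scan breaking at the last match.
import Mathlib
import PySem

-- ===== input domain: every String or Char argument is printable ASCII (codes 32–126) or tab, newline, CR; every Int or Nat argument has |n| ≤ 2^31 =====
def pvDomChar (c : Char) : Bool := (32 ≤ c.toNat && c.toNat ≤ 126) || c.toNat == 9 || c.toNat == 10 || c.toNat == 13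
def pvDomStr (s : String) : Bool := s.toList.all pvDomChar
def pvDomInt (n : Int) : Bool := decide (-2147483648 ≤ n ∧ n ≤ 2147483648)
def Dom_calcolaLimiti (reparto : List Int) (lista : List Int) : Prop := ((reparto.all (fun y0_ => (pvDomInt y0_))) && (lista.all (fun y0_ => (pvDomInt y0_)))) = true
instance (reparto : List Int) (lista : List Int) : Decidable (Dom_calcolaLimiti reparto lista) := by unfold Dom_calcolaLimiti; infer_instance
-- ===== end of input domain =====

-- B replaces A's single stateful pass (running LimiteInf/LimiteSup, LimiteSup overwritten
-- at every match) by two independent short-circuiting scans: front-to-back for the first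
-- matching index, back-to-front for the last; objective: alternative decomposition.

-- ===== PORT A =====
-- single pass over range(len(lista)) carrying the pair (LimiteInf, LimiteSup)
def calcolaLimiti (reparto : List Int) (lista : List Int) : Int × Int :=
  (PySem.List.pyRange 0 (lista.length : Int) 1).foldl
    (fun st i =>
      if PySem.List.pyGetD lista i 0 ∈ reparto then
        (if st.1 = -1 then i else st.1, i)
      else st)
    (-1, -1)

-- ===== PORT B =====
-- first index in the given index list whose element belongs to reparto, -1 if none
-- (the 'for … break' loops of Source B; pyGetD totalizes lista[i], always in range here)
def scanIdx (reparto : List Int) (lista : List Int) : List Int → Int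
  | [] => -1
  | i :: rest =>
      if PySem.List.pyGetD lista i 0 ∈ reparto then i
      else scanIdx reparto lista rest

def calcolaLimiti_alt (reparto : List Int) (lista : List Int) : Int × Int :=
  (scanIdx reparto lista (PySem.List.pyRange 0 (lista.length : Int) 1),
   scanIdx reparto lista (PySem.List.pyRange ((lista.length : Int) - 1) (-1) (-1)))

-- ===== PRECONDITION & SPEC =====
def Spec_calcolaLimiti (reparto : List Int) (lista : List Int) (out : Int × Int) : Prop := out = calcolaLimiti_alt reparto lista
instance (reparto : List Int) (lista : List Int) (out : Int × Int) : Decidable (Spec_calcolaLimiti reparto lista out) := by unfold Spec_calcolaLimiti; infer_instance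

-- ===== CLAIM (what is proved, stated in full; the proofs are below) =====
def Claim_equal_calcolaLimiti : Prop := ∀ (reparto : List Int) (lista : List Int), Dom_calcolaLimiti reparto lista → Spec_calcolaLimiti reparto lista (calcolaLimiti reparto lista)

-- ===== LEMMAS AND PROOFS =====

-- first match in the index list, with an arbitrary default
def scanD (reparto : List Int) (lista : List Int) : List Int → Int → Int
  | [], b => b
  | i :: rest, b =>
      if PySem.List.pyGetD lista i 0 ∈ reparto then i
      else scanD reparto lista rest b

-- last match in the index list, with an arbitrary default
def lastD (reparto : List Int) (lista : List Int) : List Int → Int → Int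
  | [], b => b
  | i :: rest, b =>
      lastD reparto lista rest (if PySem.List.pyGetD lista i 0 ∈ reparto then i else b)

theorem scanIdx_eq_scanD (reparto lista : List Int) (is : List Int) :
    scanIdx reparto lista is = scanD reparto lista is (-1) := by
  induction is with
  | nil => rfl
  | cons i rest ih => simp [scanIdx, scanD, ih]

theorem scanD_append_singleton (reparto lista : List Int) (l : List Int) (i b : Int) :
    scanD reparto lista (l ++ [i]) b
      = scanD reparto lista l (if PySem.List.pyGetD lista i 0 ∈ reparto then i else b) := by
  induction l with
  | nil => rfl
  | cons j rest ih => simp [scanD, ih]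

theorem lastD_eq_scanD_reverse (reparto lista : List Int) (is : List Int) :
    ∀ b, lastD reparto lista is b = scanD reparto lista is.reverse b := by
  induction is with
  | nil => intro b; rfl
  | cons i rest ih =>
      intro b
      simp [lastD, ih, scanD_append_singleton]

theorem foldl_char (reparto lista : List Int) (is : List Int) :
    ∀ a b : Int, (∀ i ∈ is, 0 ≤ i) →
      is.foldl
        (fun st i =>
          if PySem.List.pyGetD lista i 0 ∈ reparto then
            (if st.1 = -1 then i else st.1, i)
          else st)
        (a, b)
      = ((if a = -1 then scanIdx reparto lista is else a), lastD reparto lista is b) := by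
  induction is with
  | nil => intro a b _; simp [scanIdx, lastD]
  | cons i rest ih =>
      intro a b hpos
      have hi : (0:Int) ≤ i := hpos i (List.mem_cons_self ..)
      have hrest : ∀ j ∈ rest, (0:Int) ≤ j := fun j hj => hpos j (List.mem_cons_of_mem _ hj)
      by_cases hm : PySem.List.pyGetD lista i 0 ∈ reparto
      · simp only [List.foldl_cons, hm, if_pos]
        rw [ih _ _ hrest]
        by_cases ha : a = -1
        · have hine : i ≠ -1 := by omega
          simp [ha, scanIdx, lastD, hm, hine]
        · simp [ha, lastD, hm]
      · simp only [List.foldl_cons, hm, if_false]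
        rw [ih _ _ hrest]
        simp [scanIdx, lastD, hm]

-- ===== VERDICT (by name: the statement is the Claim_ definition above) =====
theorem calcolaLimiti_spec : Claim_equal_calcolaLimiti := by
  intro reparto lista _
  unfold Spec_calcolaLimiti calcolaLimiti calcolaLimiti_alt
  have hpos : ∀ i ∈ PySem.List.pyRange 0 (lista.length : Int) 1, (0:Int) ≤ i := by
    intro i hi
    exact (PySem.List.mem_pyRange_one.mp hi).1
  rw [foldl_char reparto lista _ _ _ hpos]
  have hrev : PySem.List.pyRange ((lista.length : Int) - 1) (-1) (-1)
      = (PySem.List.pyRange 0 (lista.length : Int) 1).reverse := by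
    have := PySem.List.pyRange_neg_one_eq_reverse ((lista.length : Int) - 1) (-1)
    simpa using this
  rw [hrev, lastD_eq_scanD_reverse, ← scanIdx_eq_scanD]
  simp
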